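-- pv_equiv track=rewrite | github.com/kevin-nick/python | ejercicios_de_practica.py | gama
-- ===== SOURCE A (Python) =====
-- def gama(w):
--     """
--     esta funcion calcula gama de alfa,gama,beta
--     gama(w) ---> familia de gama
--     w: palabra
--     """
--     pal = []
--     W = w.pop()
--     W = list(W)
--     for i in range(len(W)):
--         pal.append(tuple(W[i]))
--         if i < len(W)-1:
--             aux = W[i] + W[i+1]
--             pal.append(tuple(aux))
--     return pal
-- ===== SOURCE B (Python) =====
-- def gama(w):
--     W = list(w.pop())
--     n = len(W)
--     return [tuple(W[k // 2]) if k % 2 == 0 else tuple(W[k // 2] + W[k // 2 + 1])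
--             for k in range(max(0, 2 * n - 1))]
-- ===== Notes on version B (the rewrite author's own statement) =====
-- stated objective: alternative
-- what changed: Instead of A's scan over input indices with a conditional second append, B computes each of the 2n-1 output elements directly from its output position k: even k gives the single tuple of W[k//2], odd k the adjacent pair W[k//2]+W[k//2+1].
import Mathlib
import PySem

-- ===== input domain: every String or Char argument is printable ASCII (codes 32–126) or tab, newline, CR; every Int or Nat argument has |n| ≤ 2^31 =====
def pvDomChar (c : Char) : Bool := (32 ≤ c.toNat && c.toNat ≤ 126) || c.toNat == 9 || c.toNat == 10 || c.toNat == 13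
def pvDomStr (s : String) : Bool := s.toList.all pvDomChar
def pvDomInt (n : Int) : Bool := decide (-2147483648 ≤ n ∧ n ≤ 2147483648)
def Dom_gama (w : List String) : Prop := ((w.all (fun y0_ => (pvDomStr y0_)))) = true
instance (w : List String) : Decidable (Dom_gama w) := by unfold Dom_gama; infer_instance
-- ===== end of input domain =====

-- B computes each of the 2n-1 output elements directly from its output position k
-- (even k: single, odd k: adjacent pair), instead of A's scan over input indices with a
-- conditional second append; same cost, different decomposition ("alternative").
-- Both A and B pop the last element of w in place; the equivalence proved is about the RETURN value.

-- ===== PORT A =====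
-- index-guarded loop over range(len(W)); tuple(str) is the list of its one-char strings
def gama (w : List String) : List (List String) :=
  match PySem.List.pop? w (-1) with
  | none => []   -- unreachable under Pre_gama (Python raises IndexError on empty w)
  | some (s, _) =>
    let W := s.toList
    (List.range W.length).foldl (fun pal i =>
      let pal := pal ++ [[String.mk [W.getD i ' ']]]
      if i < W.length - 1 then
        pal ++ [[String.mk [W.getD i ' '], String.mk [W.getD (i + 1) ' ']]]
      else pal) []

-- ===== PORT B =====
-- element of the output at position k, read off from k's parity and k/2
def elemB (W : List Char) (k : Nat) : List String :=
  if k % 2 = 0 then [String.mk [W.getD (k / 2) ' ']]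
  else [String.mk [W.getD (k / 2) ' '], String.mk [W.getD (k / 2 + 1) ' ']]

def gama_alt (w : List String) : List (List String) :=
  match PySem.List.pop? w (-1) with
  | none => []   -- unreachable under Pre_gama
  | some (s, _) =>
    let W := s.toList
    (List.range (max 0 (2 * W.length - 1))).map (elemB W)

-- ===== PRECONDITION & SPEC =====
-- Pre_ excludes only the empty list, on which Python's w.pop() raises IndexError.
def Pre_gama (w : List String) : Prop := w ≠ []
instance (w : List String) : Decidable (Pre_gama w) := by unfold Pre_gama; infer_instance
def pvWitness_gama : List String := ["ab"]

def Spec_gama (w : List String) (out : List (List String)) : Prop := out = gama_alt w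
instance (w : List String) (out : List (List String)) : Decidable (Spec_gama w out) := by unfold Spec_gama; infer_instance

-- ===== CLAIM (what is proved, stated in full; the proofs are below) =====
def Claim_equal_gama : Prop := ∀ (w : List String), Dom_gama w → Pre_gama w → Spec_gama w (gama w)

-- ===== LEMMAS AND PROOFS =====

-- reference interleaving: s0, p0, s1, p1, …, s_{n-1}
def interC : List Char → List (List String)
  | [] => []
  | [a] => [[String.mk [a]]]
  | a :: b :: t =>
      [String.mk [a]] :: [String.mk [a], String.mk [b]] :: interC (b :: t)

theorem gamaA_loop (W : List Char) : ∀ (acc : List (List String)),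
    (List.range W.length).foldl (fun pal i =>
      let pal := pal ++ [[String.mk [W.getD i ' ']]]
      if i < W.length - 1 then
        pal ++ [[String.mk [W.getD i ' '], String.mk [W.getD (i + 1) ' ']]]
      else pal) acc = acc ++ interC W := by
  induction W with
  | nil => intro acc; simp [interC]
  | cons a t ih =>
    intro acc
    rw [List.length_cons, List.range_succ_eq_map, List.foldl_cons, List.foldl_map]
    rw [List.foldl_ext _ (fun (pal : List (List String)) (i : Nat) =>
        let pal := pal ++ [[String.mk [t.getD i ' ']]]
        if i < t.length - 1 then
          pal ++ [[String.mk [t.getD i ' '], String.mk [t.getD (i + 1) ' ']]]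
        else pal) _
      (by
        intro pal i _
        simp only [List.getD_cons_succ]
        by_cases h : i < t.length - 1
        · rw [if_pos h, if_pos (by omega)]
        · rw [if_neg h, if_neg (by omega)])]
    rw [ih]
    cases t with
    | nil => simp [interC]
    | cons b t' => simp [interC]

theorem gamaB_eq_inter (W : List Char) :
    (List.range (max 0 (2 * W.length - 1))).map (elemB W) = interC W := by
  induction W with
  | nil => simp [interC]
  | cons a t ih =>
    cases t with
    | nil => simp [interC, elemB]
    | cons b t' =>
      have hlen : max 0 (2 * (a :: b :: t').length - 1)
          = (max 0 (2 * (b :: t').length - 1)) + 1 + 1 := by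
        simp [List.length_cons]; omega
      rw [hlen, List.range_succ_eq_map, List.range_succ_eq_map]
      simp only [List.map_cons, List.map_map]
      have hshift : (elemB (a :: b :: t')) ∘ (Nat.succ ∘ Nat.succ) = elemB (b :: t') := by
        funext k
        simp only [Function.comp_apply, elemB]
        have h2 : (k + 1 + 1) % 2 = k % 2 := by omega
        have h3 : (k + 1 + 1) / 2 = k / 2 + 1 := by omega
        rw [h2, h3, List.getD_cons_succ, List.getD_cons_succ]
      rw [hshift, ih]
      simp [interC, elemB]

-- ===== VERDICT (by name: the statement is the Claim_ definition above) =====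
theorem gama_spec : Claim_equal_gama := by
  intro w _ hpre
  unfold Spec_gama gama gama_alt
  rcases w.eq_nil_or_concat with rfl | ⟨ys, y, rfl⟩
  · exact absurd rfl hpre
  · rw [List.concat_eq_append, PySem.List.pop?_last]
    dsimp only
    rw [gamaB_eq_inter, gamaA_loop, List.nil_append]
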